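-- pv_equiv track=rewrite | github.com/fadhelcherif/DeepLearning_Cars | app.py | pick_resnet_variant
-- ===== SOURCE A (Python) =====
-- from typing import Any, Dict, List, Tuple
--
-- def pick_resnet_variant(keys: List[str]) -> str:
--     if any(".conv3." in k for k in keys):
--         return "resnet50"
--
--     max_layer3_block = -1
--     for k in keys:
--         if k.startswith("layer3."):
--             parts = k.split(".")
--             if len(parts) >= 2 and parts[1].isdigit():
--                 max_layer3_block = max(max_layer3_block, int(parts[1]))
--
--     return "resnet34" if max_layer3_block >= 3 else "resnet18"
-- ===== SOURCE B (Python) =====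
-- def pick_resnet_variant(keys):
--     variants = ("resnet18", "resnet34", "resnet50")
--
--     def rank(k):
--         if ".conv3." in k:
--             return 2
--         if k.startswith("layer3."):
--             parts = k.split(".")
--             if len(parts) >= 2 and parts[1].isdigit() and int(parts[1]) >= 3:
--                 return 1
--         return 0
--
--     best = 0
--     for k in keys:
--         r = rank(k)
--         if r > best:
--             best = r
--             if best == 2:
--                 break
--     return variants[best]
-- ===== Notes on version B (the rewrite author's own statement) =====
-- stated objective: alternative
-- what changed: B replaces A's staged boolean scans (any() for the conv3 marker, then a running maximum over layer3 block indices compared to 3) with a per-key severity classifier mapped to {0,1,2}, a single early-exiting maximum of those ranks, and an index into a variant table.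
import Mathlib
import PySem

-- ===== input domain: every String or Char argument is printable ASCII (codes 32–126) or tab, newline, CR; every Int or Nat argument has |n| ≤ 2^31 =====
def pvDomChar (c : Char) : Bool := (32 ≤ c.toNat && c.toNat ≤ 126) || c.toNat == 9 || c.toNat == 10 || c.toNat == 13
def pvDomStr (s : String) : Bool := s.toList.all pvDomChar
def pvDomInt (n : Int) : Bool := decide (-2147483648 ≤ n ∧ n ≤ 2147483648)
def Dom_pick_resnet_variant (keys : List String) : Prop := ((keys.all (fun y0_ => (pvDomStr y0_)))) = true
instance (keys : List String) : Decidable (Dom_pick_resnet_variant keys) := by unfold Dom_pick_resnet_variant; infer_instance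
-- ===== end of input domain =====

-- B replaces A's staged boolean scans (any-'.conv3.' pass, then a running maximum of
-- layer3 block indices) by a per-key severity rank in {0,1,2}, an early-exiting maximum
-- of the ranks, and a table lookup; same outputs on all inputs (alternative decomposition).

-- ===== PORT A =====
-- one step of A's running-maximum loop over layer3 block indices
-- (the int() call is guarded by isdigit in A, so ofStr? is always `some` where the
--  .getD 0 default is reached through the guard; the default is never used)
def pvAStep (m : Int) (k : String) : Int :=
  if PySem.Str.startswith k "layer3." then
    let parts := (PySem.Str.split? k ".").getD []
    if 2 ≤ parts.length ∧ PySem.Str.strIsdigit (parts.getD 1 "") = true then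
      max m ((PySem.Int.ofStr? (parts.getD 1 "")).getD 0)
    else m
  else m

def pick_resnet_variant (keys : List String) : String :=
  if keys.any (fun k => PySem.Str.isIn ".conv3." k) then "resnet50"
  else
    let max_layer3_block := keys.foldl pvAStep (-1)
    if 3 ≤ max_layer3_block then "resnet34" else "resnet18"

-- ===== PORT B =====
-- B's per-key severity classifier: 2 = conv3 bottleneck key, 1 = deep layer3 block key, 0 = neither
def pvRank (k : String) : Int :=
  if PySem.Str.isIn ".conv3." k then 2
  else if PySem.Str.startswith k "layer3." then
    let parts := (PySem.Str.split? k ".").getD []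
    if decide (2 ≤ parts.length) && PySem.Str.strIsdigit (parts.getD 1 "")
        && decide (3 ≤ (PySem.Int.ofStr? (parts.getD 1 "")).getD 0) then 1 else 0
  else 0

-- B's loop: running maximum of ranks with an early exit once the top rank 2 is reached
def pvBest : List String → Int → Int
  | [], best => best
  | k :: ks, best =>
    let r := pvRank k
    if best < r then (if r = 2 then 2 else pvBest ks r) else pvBest ks best

def pick_resnet_variant_alt (keys : List String) : String :=
  let variants := ["resnet18", "resnet34", "resnet50"]
  -- the index is always 0, 1 or 2, so Python's tuple indexing never raises; .getD "" is never used
  (PySem.List.pyGet? variants (pvBest keys 0)).getD ""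

-- ===== PRECONDITION & SPEC =====
def Spec_pick_resnet_variant (keys : List String) (out : String) : Prop := out = pick_resnet_variant_alt keys
instance (keys : List String) (out : String) : Decidable (Spec_pick_resnet_variant keys out) := by unfold Spec_pick_resnet_variant; infer_instance

-- ===== CLAIM (what is proved, stated in full; the proofs are below) =====
def Claim_equal_pick_resnet_variant : Prop := ∀ (keys : List String), Dom_pick_resnet_variant keys → Spec_pick_resnet_variant keys (pick_resnet_variant keys)

-- ===== LEMMAS AND PROOFS =====

-- proof-side helper: "key is a layer3 block entry with index ≥ 3"
def pvDeep (k : String) : Bool :=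
  if PySem.Str.startswith k "layer3." then
    let parts := (PySem.Str.split? k ".").getD []
    decide (2 ≤ parts.length) && PySem.Str.strIsdigit (parts.getD 1 "")
      && decide (3 ≤ (PySem.Int.ofStr? (parts.getD 1 "")).getD 0)
  else false

lemma pvRank_eq (k : String) :
    pvRank k = if PySem.Str.isIn ".conv3." k then 2 else if pvDeep k then 1 else 0 := by
  unfold pvRank pvDeep
  by_cases hs : PySem.Str.startswith k "layer3." = true
  · rw [if_pos hs, if_pos hs]
  · rw [if_neg hs, if_neg hs]
    by_cases hc : PySem.Str.isIn ".conv3." k = true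
    · rw [if_pos hc, if_pos hc]
    · rw [if_neg hc, if_neg hc]; decide

lemma pvRank_range (k : String) : 0 ≤ pvRank k ∧ pvRank k ≤ 2 := by
  rw [pvRank_eq]; split_ifs <;> omega

-- the plain maximum of ranks
def pvMaxR (ks : List String) : Int := ks.foldr (fun k m => max (pvRank k) m) 0

lemma pvMaxR_range (ks : List String) : 0 ≤ pvMaxR ks ∧ pvMaxR ks ≤ 2 := by
  induction ks with
  | nil => simp [pvMaxR]
  | cons k ks ih =>
    have := pvRank_range k
    simp only [pvMaxR, List.foldr_cons] at *
    omega

-- the early-exiting loop computes the same maximum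
lemma pvBest_eq (ks : List String) (b : Int) (hb0 : 0 ≤ b) (hb2 : b ≤ 2) :
    pvBest ks b = max b (pvMaxR ks) := by
  induction ks generalizing b with
  | nil => simp [pvBest, pvMaxR]; omega
  | cons k ks ih =>
    have hr := pvRank_range k
    have hm := pvMaxR_range ks
    simp only [pvBest, pvMaxR, List.foldr_cons]
    have hmk : pvMaxR ks = ks.foldr (fun k m => max (pvRank k) m) 0 := rfl
    split_ifs with h1 h2
    · rw [← hmk]; omega
    · rw [ih (pvRank k) hr.1 hr.2, ← hmk]; omega
    · rw [ih b hb0 hb2, ← hmk]; omega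

-- the maximum rank in terms of the two scans of A
lemma pvMaxR_cases (ks : List String) :
    pvMaxR ks = if ks.any (fun k => PySem.Str.isIn ".conv3." k) then 2
                else if ks.any pvDeep then 1 else 0 := by
  induction ks with
  | nil => simp [pvMaxR]
  | cons k ks ih =>
    simp only [pvMaxR, List.foldr_cons, List.any_cons] at *
    rw [ih, pvRank_eq]
    rcases (PySem.Str.isIn ".conv3." k).eq_false_or_eq_true with hc | hc <;>
      rcases (pvDeep k).eq_false_or_eq_true with hd | hd <;>
      rcases (ks.any (fun k => PySem.Str.isIn ".conv3." k)).eq_false_or_eq_true with hcs | hcs <;>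
      rcases (ks.any pvDeep).eq_false_or_eq_true with hds | hds <;>
      simp only [hc, hd, hcs, hds] <;> decide

-- A's running maximum reaches 3 iff the start does or some key is a deep layer3 block
lemma foldl_max_ge (keys : List String) (m : Int) :
    3 ≤ keys.foldl pvAStep m ↔ (3 ≤ m ∨ keys.any pvDeep = true) := by
  induction keys generalizing m with
  | nil => simp
  | cons k ks ih =>
    simp only [List.foldl_cons, List.any_cons, Bool.or_eq_true, ih]
    have hstep : (3 ≤ pvAStep m k ↔ 3 ≤ m ∨ pvDeep k = true) := by
      unfold pvAStep pvDeep
      simp only [List.getD_eq_getElem?_getD]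
      split_ifs with h1 h2
      · simp only [PySem.Str.strIsdigit_eq] at h2
        simp [h2.1, h2.2]
      · simp only [PySem.Str.strIsdigit_eq] at h2
        simp only [Bool.and_eq_true, decide_eq_true_iff, PySem.Str.strIsdigit_eq]
        constructor
        · exact Or.inl
        · rintro (h | ⟨⟨ha, hb⟩, _⟩)
          · exact h
          · exact absurd ⟨ha, hb⟩ h2
      · simp
    rw [hstep]; tauto

-- ===== VERDICT (by name: the statement is the Claim_ definition above) =====
theorem pick_resnet_variant_spec : Claim_equal_pick_resnet_variant := by
  intro keys _
  unfold Spec_pick_resnet_variant pick_resnet_variant pick_resnet_variant_alt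
  have hb := pvBest_eq keys 0 (by omega) (by omega)
  have hm0 := pvMaxR_range keys
  have hmax : max (0:Int) (pvMaxR keys) = pvMaxR keys := by omega
  rw [hb, hmax, pvMaxR_cases]
  by_cases hc : keys.any (fun k => PySem.Str.isIn ".conv3." k) = true
  · rw [if_pos hc, if_pos hc]; decide
  · rw [if_neg hc, if_neg hc]
    by_cases hd : keys.any pvDeep = true
    · have h3 : 3 ≤ keys.foldl pvAStep (-1) := (foldl_max_ge keys (-1)).mpr (Or.inr hd)
      rw [if_pos h3, if_pos hd]; decide
    · rw [Bool.not_eq_true] at hd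
      have h3 : ¬ 3 ≤ keys.foldl pvAStep (-1) := by
        rw [foldl_max_ge]
        rintro (h | h)
        · omega
        · simp [hd] at h
      rw [if_neg h3, if_neg (by simp [hd])]; decide
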